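-- pv_equiv track=rewrite | github.com/dudamarlena/pyc_source | pycfiles/djangoplus-0.0.98.tar/metadata.cpython-37.py | should_add_action
-- ===== SOURCE A (Python) =====
-- def should_add_action(action_inline, action_subsets, current_subset):
--     subsets = []
--     if current_subset == 'all':
--         current_subset = None
--     elif action_subsets:
--         for subset_name in action_subsets:
--             if subset_name == 'all':
--                 subsets.append(None)
--             else:
--                 subsets.append(subset_name)
--
--         if action_inline and None not in subsets:
--             subsets.append(None)
--     elif action_inline:
--         subsets.append(None)
--     return current_subset in subsets
-- ===== SOURCE B (Python) =====
-- def should_add_action(action_inline, action_subsets, current_subset):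
--     # current_subset is a str, so the None entries A builds can never match it;
--     # the result reduces to plain membership.
--     return current_subset != 'all' and bool(action_subsets) and current_subset in action_subsets
-- ===== Notes on version B (the rewrite author's own statement) =====
-- stated objective: simpler
-- what changed: B drops A's intermediate subsets list (with the 'all'->None collapse and the conditional None appends, which can never match a string current_subset) and returns the membership result directly as one boolean expression.
import Mathlib
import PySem

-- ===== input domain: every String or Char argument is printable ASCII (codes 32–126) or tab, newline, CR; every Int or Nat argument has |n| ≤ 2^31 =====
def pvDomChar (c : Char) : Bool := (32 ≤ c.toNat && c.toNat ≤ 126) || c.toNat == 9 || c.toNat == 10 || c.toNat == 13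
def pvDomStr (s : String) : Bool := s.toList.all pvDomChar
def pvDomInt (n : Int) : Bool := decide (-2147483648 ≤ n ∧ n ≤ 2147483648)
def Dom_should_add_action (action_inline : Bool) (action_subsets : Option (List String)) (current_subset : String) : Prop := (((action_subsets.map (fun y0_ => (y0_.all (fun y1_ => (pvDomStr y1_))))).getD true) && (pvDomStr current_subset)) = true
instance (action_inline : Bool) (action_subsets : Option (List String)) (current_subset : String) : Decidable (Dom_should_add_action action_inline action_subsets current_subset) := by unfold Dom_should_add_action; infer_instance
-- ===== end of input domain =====

-- B replaces A's intermediate Option-list construction and loop with a direct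
-- boolean case analysis (simpler; same return value everywhere).
-- ===== PORT A =====
def should_add_action (action_inline : Bool) (action_subsets : Option (List String)) (current_subset : String) : Bool :=
  let subsets : List (Option String) := []
  if current_subset == "all" then
    -- current_subset = None; none of the branches below ran, subsets = []
    subsets.contains (none : Option String)
  else
    match action_subsets with
    | some l =>
      if !l.isEmpty then
        -- for subset_name in action_subsets: append None for 'all', else the name
        let subsets := l.foldl
          (fun acc subset_name =>
            acc ++ [if subset_name == "all" then (none : Option String) else some subset_name])
          subsets
        let subsets :=
          if action_inline && !subsets.contains (none : Option String) then subsets ++ [none]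
          else subsets
        subsets.contains (some current_subset)
      else
        if action_inline then (subsets ++ [(none : Option String)]).contains (some current_subset)
        else subsets.contains (some current_subset)
    | none =>
      if action_inline then (subsets ++ [(none : Option String)]).contains (some current_subset)
      else subsets.contains (some current_subset)

-- ===== PORT B =====
def should_add_action_alt (action_inline : Bool) (action_subsets : Option (List String)) (current_subset : String) : Bool :=
  (current_subset != "all") &&
    (match action_subsets with
     | none => false
     | some l => (!l.isEmpty) && l.contains current_subset)

-- ===== PRECONDITION & SPEC =====
def Spec_should_add_action (action_inline : Bool) (action_subsets : Option (List String)) (current_subset : String) (out : Bool) : Prop := out = should_add_action_alt action_inline action_subsets current_subset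
instance (action_inline : Bool) (action_subsets : Option (List String)) (current_subset : String) (out : Bool) : Decidable (Spec_should_add_action action_inline action_subsets current_subset out) := by unfold Spec_should_add_action; infer_instance

-- ===== CLAIM (what is proved, stated in full; the proofs are below) =====
def Claim_equal_should_add_action : Prop := ∀ (action_inline : Bool) (action_subsets : Option (List String)) (current_subset : String), Dom_should_add_action action_inline action_subsets current_subset → Spec_should_add_action action_inline action_subsets current_subset (should_add_action action_inline action_subsets current_subset)

-- ===== LEMMAS AND PROOFS =====

-- membership of `some cs` (cs ≠ "all") in the collapsed list is plain membership in l
theorem sa_mem_map (l : List String) (cs : String) (h : ¬ cs = "all") :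
    (some cs ∈ l.map (fun s => if s == "all" then (none : Option String) else some s)) ↔ cs ∈ l := by
  simp only [List.mem_map]
  constructor
  · rintro ⟨a, ha, hfa⟩
    by_cases h2 : a = "all"
    · simp [h2] at hfa
    · simp [h2] at hfa; subst hfa; exact ha
  · intro hm; exact ⟨cs, hm, by simp [h]⟩

theorem should_add_action_spec : Claim_equal_should_add_action := by
  intro ai as cs _
  unfold Spec_should_add_action should_add_action should_add_action_alt
  by_cases h : cs = "all"
  · simp [h]
  · cases as with
    | none => cases ai <;> simp [h]
    | some l =>
      by_cases hl : l.isEmpty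
      · cases ai <;> simp [h, hl]
      · have hm := sa_mem_map l cs h
        simp only [List.nil_append, beq_iff_eq, h, if_false, hl, Bool.not_false]
        split_ifs with hif <;>
          simp [List.mem_append, hm, h]
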